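-- pv_equiv track=rewrite | github.com/mmingyu/BOJ | foo_bar_2_1.py | ntob
-- ===== SOURCE A (Python) =====
-- def ntob(n, b, l):
--     ret = []
--     while n:
--         ret.append(str(n % b))
--         n //= b
--     while len(ret) < l:
--         ret.append('0')
--     return ''.join(ret[::-1])
-- ===== SOURCE B (Python) =====
-- def ntob(n, b, l):
--     def digits(n):
--         if n == 0:
--             return ('', 0)
--         body, cnt = digits(n // b)
--         return (body + str(n % b), cnt + 1)
--     body, cnt = digits(n)
--     return '0' * max(l - cnt, 0) + body
-- ===== Notes on version B (the rewrite author's own statement) =====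
-- stated objective: simpler
-- what changed: Replaces A's three staged passes (append-digits loop, padding loop, reverse-and-join of a list) with a single recursion that emits each digit most-significant-first by string concatenation and returns a digit count, so padding is one bulk string multiplication '0'*max(l-cnt,0) prepended at the top and no list, reversal or padding loop exists.
import Mathlib
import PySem

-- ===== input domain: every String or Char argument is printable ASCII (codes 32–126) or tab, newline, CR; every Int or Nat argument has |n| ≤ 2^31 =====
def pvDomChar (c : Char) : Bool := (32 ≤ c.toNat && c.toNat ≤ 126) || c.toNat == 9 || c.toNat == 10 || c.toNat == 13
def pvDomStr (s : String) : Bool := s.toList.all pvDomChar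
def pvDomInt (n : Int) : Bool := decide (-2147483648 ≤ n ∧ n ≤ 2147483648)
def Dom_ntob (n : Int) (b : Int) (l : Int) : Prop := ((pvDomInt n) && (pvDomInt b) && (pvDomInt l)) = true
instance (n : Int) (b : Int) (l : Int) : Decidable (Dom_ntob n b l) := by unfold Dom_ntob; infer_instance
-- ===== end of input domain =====

-- B replaces A's three staged passes (digit loop, padding loop, reverse-and-join of a list) with
-- one recursion emitting digits most-significant-first plus a digit count, padding once up front
-- (objective: simpler).

-- Termination measure shared by both ports' recursions on n ↦ n // b (the Python loops terminate
-- exactly on Pre_; the dite guards below only make the same computation total in Lean).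
def muNtob (n b : Int) : Nat := 2 * n.natAbs + (if 0 < n ∧ b < 0 then 1 else 0)

theorem muNtob_lt (n b : Int) (hn : n ≠ 0) (h : (2 ≤ b ∧ 0 ≤ n) ∨ b ≤ -2) :
    muNtob (PySem.Int.floordiv n b) b < muNtob n b := by
  have hqr := PySem.Int.floordiv_mul_add_mod n b
  set q := PySem.Int.floordiv n b with hq
  set r := PySem.Int.mod n b with hr
  rcases h with ⟨hb, hn0⟩ | hb
  · have hr0 : 0 ≤ r := PySem.Int.mod_nonneg n (by omega)
    have hrb : r < b := PySem.Int.mod_lt n (by omega)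
    have hq0 : 0 ≤ q := by nlinarith
    have hq2 : 2 * q ≤ n := by nlinarith
    simp only [muNtob]
    split_ifs <;> omega
  · have hrb := PySem.Int.mod_neg_bounds n (show b < 0 by omega)
    by_cases hn1 : 0 < n
    · have hq1 : q ≤ -1 := by nlinarith
      have hq2 : -q ≤ n := by nlinarith
      simp only [muNtob]
      split_ifs <;> omega
    · have hn2 : n < 0 := by omega
      have hq0 : 0 ≤ q := by nlinarith
      have hq2 : q ≤ -n - 1 := by nlinarith
      simp only [muNtob]
      split_ifs <;> omega

-- ===== PORT A =====
-- while n: ret.append(str(n % b)); n //= b      (dite guard = totality only; Python diverges outside it)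
def ntobDigits (n b : Int) (ret : List String) : List String :=
  if h : n ≠ 0 ∧ ((2 ≤ b ∧ 0 ≤ n) ∨ b ≤ -2) then
    ntobDigits (PySem.Int.floordiv n b) b (ret ++ [PySem.Int.toStr (PySem.Int.mod n b)])
  else ret
termination_by muNtob n b
decreasing_by exact muNtob_lt n b h.1 h.2

-- while len(ret) < l: ret.append('0')
def ntobPad (ret : List String) (l : Int) : List String :=
  if h : PySem.List.len ret < l then ntobPad (ret ++ ["0"]) l else ret
termination_by (l - ret.length).toNat
decreasing_by simp only [PySem.List.len_eq] at h; simp; omega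

-- return ''.join(ret[::-1])      (ret[::-1] is List.reverse)
def ntob (n : Int) (b : Int) (l : Int) : String :=
  PySem.Str.join "" ((ntobPad (ntobDigits n b []) l).reverse)

-- ===== PORT B =====
-- def digits(n): if n == 0: return ('', 0); body, cnt = digits(n // b); return (body + str(n % b), cnt + 1)
-- (string concatenation ported on List Char; the dite guard, stated via |b| here, is totality only)
def ntobGo (n b : Int) : List Char × Int :=
  if h : n ≠ 0 ∧ 2 ≤ b.natAbs ∧ (0 ≤ n ∨ b < 0) then
    let p := ntobGo (PySem.Int.floordiv n b) b
    (p.1 ++ (PySem.Int.toStr (PySem.Int.mod n b)).toList, p.2 + 1)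
  else ([], 0)
termination_by muNtob n b
decreasing_by exact muNtob_lt n b h.1 (by rcases h with ⟨_, hb, hnb⟩; omega)

-- return '0' * max(l - cnt, 0) + body
def ntob_alt (n : Int) (b : Int) (l : Int) : String :=
  String.ofList (List.replicate (max (l - (ntobGo n b).2) 0).toNat '0' ++ (ntobGo n b).1)

-- ===== PRECONDITION & SPEC =====
-- Pre_ excludes exactly the inputs where A never returns: b = 0 with n ≠ 0 raises ZeroDivisionError,
-- and n ≠ 0 with b ∈ {-1, 1}, or n < 0 with b ≥ 2, make A's first while-loop spin forever.
def Pre_ntob (n : Int) (b : Int) (l : Int) : Prop := (2 ≤ b ∧ 0 ≤ n) ∨ b ≤ -2 ∨ n = 0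
instance (n : Int) (b : Int) (l : Int) : Decidable (Pre_ntob n b l) := by unfold Pre_ntob; infer_instance
def pvWitness_ntob : Int × Int × Int := (11, 2, 6)

def Spec_ntob (n : Int) (b : Int) (l : Int) (out : String) : Prop := out = ntob_alt n b l
instance (n : Int) (b : Int) (l : Int) (out : String) : Decidable (Spec_ntob n b l out) := by unfold Spec_ntob; infer_instance

-- ===== CLAIM (what is proved, stated in full; the proofs are below) =====
def Claim_equal_ntob : Prop := ∀ (n : Int) (b : Int) (l : Int), Dom_ntob n b l → Pre_ntob n b l → Spec_ntob n b l (ntob n b l)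

-- ===== LEMMAS AND PROOFS =====

-- the two ports' totality guards are the same condition, stated differently
theorem ntobGuard_iff (n b : Int) :
    (n ≠ 0 ∧ 2 ≤ b.natAbs ∧ (0 ≤ n ∨ b < 0)) ↔ (n ≠ 0 ∧ ((2 ≤ b ∧ 0 ≤ n) ∨ b ≤ -2)) := by
  omega

-- ''.join distributes over ++ (sep-free join is concatenation)
theorem joinNil_append (xs ys : List (List Char)) :
    PySem.Chars.join [] (xs ++ ys) = PySem.Chars.join [] xs ++ PySem.Chars.join [] ys := by
  induction xs with
  | nil => simp [PySem.Chars.join_nil]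
  | cons p ps ih =>
    cases ps with
    | nil =>
      cases ys with
      | nil => simp [PySem.Chars.join_nil, PySem.Chars.join_singleton]
      | cons q qs => simp [PySem.Chars.join_singleton, PySem.Chars.join_cons_cons]
    | cons p' ps' =>
      simp only [List.cons_append] at ih ⊢
      rw [PySem.Chars.join_cons_cons, PySem.Chars.join_cons_cons, ih]
      simp

theorem ntobDigits_acc (k : Nat) : ∀ (n b : Int), muNtob n b ≤ k → ∀ acc,
    ntobDigits n b acc = acc ++ ntobDigits n b [] := by
  induction k with
  | zero =>
    intro n b hk acc
    have hn : ¬(n ≠ 0 ∧ ((2 ≤ b ∧ 0 ≤ n) ∨ b ≤ -2)) := by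
      intro h; simp only [muNtob] at hk; have := h.1; omega
    conv_lhs => rw [ntobDigits]
    conv_rhs => rw [ntobDigits]
    simp [hn]
  | succ k ih =>
    intro n b hk acc
    by_cases h : n ≠ 0 ∧ ((2 ≤ b ∧ 0 ≤ n) ∨ b ≤ -2)
    · have hlt := muNtob_lt n b h.1 h.2
      conv_lhs => rw [ntobDigits]
      conv_rhs => rw [ntobDigits]
      simp only [dif_pos h, List.nil_append]
      rw [ih _ b (by omega) (acc ++ [PySem.Int.toStr (PySem.Int.mod n b)]),
          ih _ b (by omega) ([PySem.Int.toStr (PySem.Int.mod n b)])]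
      simp
    · conv_lhs => rw [ntobDigits]
      conv_rhs => rw [ntobDigits]
      simp [h]

theorem ntobPad_eq (k : Nat) : ∀ (ret : List String) (l : Int), (l - ret.length).toNat ≤ k →
    ntobPad ret l = ret ++ List.replicate (l - ret.length).toNat "0" := by
  induction k with
  | zero =>
    intro ret l hk
    rw [ntobPad]
    split_ifs with h
    · simp only [PySem.List.len_eq] at h; omega
    · simp only [PySem.List.len_eq, not_lt] at h
      have : (l - (ret.length : Int)).toNat = 0 := by omega
      simp [this]
  | succ k ih =>
    intro ret l hk
    rw [ntobPad]
    split_ifs with h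
    · simp only [PySem.List.len_eq] at h
      rw [ih (ret ++ ["0"]) l (by simp; omega)]
      have h1 : (l - ((ret ++ ["0"]).length : Int)).toNat + 1 = (l - ret.length).toNat := by
        simp; omega
      rw [List.append_assoc]
      congr 1
      rw [← h1, List.replicate_succ]
      simp
    · simp only [PySem.List.len_eq, not_lt] at h
      have : (l - (ret.length : Int)).toNat = 0 := by omega
      simp [this]

-- B's recursion computes exactly the joined reversal of A's digit list, with its length as count
theorem ntobGo_eq (k : Nat) : ∀ (n b : Int), muNtob n b ≤ k →
    (ntobGo n b).1 = PySem.Chars.join [] (List.map String.toList (ntobDigits n b []).reverse) ∧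
    (ntobGo n b).2 = ((ntobDigits n b []).length : Int) := by
  induction k with
  | zero =>
    intro n b hk
    have hn : ¬(n ≠ 0 ∧ ((2 ≤ b ∧ 0 ≤ n) ∨ b ≤ -2)) := by
      intro h; simp only [muNtob] at hk; have := h.1; omega
    rw [ntobGo, ntobDigits, dif_neg ((not_iff_not.mpr (ntobGuard_iff n b)).mpr hn), dif_neg hn]
    simp [PySem.Chars.join_nil]
  | succ k ih =>
    intro n b hk
    by_cases h : n ≠ 0 ∧ ((2 ≤ b ∧ 0 ≤ n) ∨ b ≤ -2)
    · have hlt := muNtob_lt n b h.1 h.2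
      rw [ntobGo, ntobDigits, dif_pos ((ntobGuard_iff n b).mpr h), dif_pos h]
      simp only [List.nil_append]
      set n' := PySem.Int.floordiv n b with hn'
      set d := PySem.Int.toStr (PySem.Int.mod n b) with hd
      obtain ⟨ih1, ih2⟩ := ih n' b (by omega)
      rw [ntobDigits_acc (muNtob n' b) n' b le_rfl [d]]
      constructor
      · simp only [List.reverse_append, List.reverse_cons, List.reverse_nil, List.nil_append,
          List.map_append, List.map, joinNil_append, PySem.Chars.join_singleton]
        rw [ih1]
      · simp only [List.length_append, List.length_cons, List.length_nil]
        rw [ih2]; push_cast; ring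
    · rw [ntobGo, ntobDigits, dif_neg ((not_iff_not.mpr (ntobGuard_iff n b)).mpr h), dif_neg h]
      simp [PySem.Chars.join_nil]

theorem ntob_main (n b l : Int) : (ntob n b l).toList = (ntob_alt n b l).toList := by
  obtain ⟨hg1, hg2⟩ := ntobGo_eq (muNtob n b) n b le_rfl
  set D := ntobDigits n b [] with hD
  rw [ntob, ntob_alt, ntobPad_eq ((l - (D.length : Int)).toNat) D l le_rfl]
  have hsep : ("" : String).toList = ([] : List Char) := rfl
  have h0 : ("0" : String).toList = ['0'] := rfl
  have hcnt : (max (l - (ntobGo n b).2) 0).toNat = (l - (D.length : Int)).toNat := by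
    rw [hg2]; omega
  rw [String.toList_ofList, hcnt, hg1]
  simp only [List.reverse_append, List.reverse_replicate, PySem.Str.toList_join, List.map_append,
    List.map_replicate, hsep, h0, joinNil_append]
  congr 1
  rw [show List.replicate (l - (D.length : Int)).toNat ['0']
      = List.map (fun c => [c]) (List.replicate (l - (D.length : Int)).toNat '0') from by
    simp [List.map_replicate]]
  rw [PySem.Chars.join_nil_singletons]

-- ===== VERDICT (by name: the statement is the Claim_ definition above) =====
theorem ntob_spec : Claim_equal_ntob := by
  intro n b l _ _
  unfold Spec_ntob
  exact String.toList_inj.mp (ntob_main n b l)
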